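-- pv_equiv track=rewrite | github.com/mochilang/mochi | tests/leetcode/x/python/0630.py | solve
-- ===== SOURCE A (Python) =====
-- import heapq
--
-- def solve(courses: list[tuple[int, int]]) -> int:
--     courses.sort(key=lambda x: x[1])
--     total = 0
--     heap: list[int] = []
--     for duration, last_day in courses:
--         total += duration
--         heapq.heappush(heap, -duration)
--         if total > last_day:
--             total += heapq.heappop(heap)
--     return len(heap)
-- ===== SOURCE B (Python) =====
-- def solve(courses: list[tuple[int, int]]) -> int:
--     courses.sort(key=lambda x: x[1])
--     selected: list[int] = []  # durations of chosen courses, kept sorted ascending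
--     total = 0
--     for duration, last_day in courses:
--         # ordered insert (after any equal elements)
--         i = 0
--         while i < len(selected) and selected[i] <= duration:
--             i += 1
--         selected.insert(i, duration)
--         total += duration
--         if total > last_day:
--             total -= selected.pop()  # drop the longest chosen course (last of sorted list)
--     return len(selected)
-- ===== Notes on version B (the rewrite author's own statement) =====
-- stated objective: simpler
-- what changed: Replaces the max-heap (negated durations pushed/popped with heapq) by a plain sorted Python list of chosen durations: ordered insert, and dropping the longest course is just selected.pop() of the last element.
import Mathlib
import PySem

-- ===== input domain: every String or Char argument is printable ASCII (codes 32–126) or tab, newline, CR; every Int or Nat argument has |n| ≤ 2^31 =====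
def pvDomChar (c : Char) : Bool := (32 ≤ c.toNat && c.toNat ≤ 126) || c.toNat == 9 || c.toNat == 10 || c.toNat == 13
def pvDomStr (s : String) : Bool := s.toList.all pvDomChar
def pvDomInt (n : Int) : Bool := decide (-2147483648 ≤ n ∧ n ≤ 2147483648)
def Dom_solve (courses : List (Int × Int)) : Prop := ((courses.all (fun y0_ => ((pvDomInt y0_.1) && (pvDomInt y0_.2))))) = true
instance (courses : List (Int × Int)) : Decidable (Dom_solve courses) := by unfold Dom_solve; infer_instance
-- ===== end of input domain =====

-- B replaces A's heapq max-heap of negated durations by a sorted list of chosen durations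
-- (ordered insert, drop last); equivalence is about the RETURN value — both Pythons sort
-- `courses` in place by deadline, so the observable mutation is identical.

-- ===== PORT A =====
-- heapq model: the heap's internal array layout is unobservable in `solve` (only len(heap)
-- and the popped values are used), so heappush/heappop are ported by their exact heapq
-- semantics on the multiset of elements: push adds the element, pop removes and returns
-- the smallest.  Exact for this use.
def heappushA (h : List Int) (x : Int) : List Int := h ++ [x]

def heappopA (h : List Int) : Int × List Int :=
  match h.min? with
  | some m => (m, h.erase m)
  | none => (0, h)  -- empty heap: unreachable in `solve` (every pop follows a push)

def solveStep (st : Int × List Int) (c : Int × Int) : Int × List Int :=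
  let total := st.1 + c.1
  let heap := heappushA st.2 (-c.1)
  if total > c.2 then
    let p := heappopA heap
    (total + p.1, p.2)
  else
    (total, heap)

def solve (courses : List (Int × Int)) : Int :=
  let cs := PySem.List.sorted courses (fun x => x.2) false
  let st := cs.foldl solveStep (0, [])
  (st.2.length : Int)

-- ===== PORT B =====
-- ordered insert into a sorted list: the while loop in Source B scans past all elements ≤ x
def insortB (x : Int) (s : List Int) : List Int :=
  match s with
  | [] => [x]
  | y :: t => if y ≤ x then y :: insortB x t else x :: y :: t

def solveAltStep (st : Int × List Int) (c : Int × Int) : Int × List Int :=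
  let sel := insortB c.1 st.2
  let total := st.1 + c.1
  if total > c.2 then
    (total - sel.getLast?.getD 0, sel.dropLast)  -- selected.pop(): sel is nonempty here
  else
    (total, sel)

def solve_alt (courses : List (Int × Int)) : Int :=
  let cs := PySem.List.sorted courses (fun x => x.2) false
  let st := cs.foldl solveAltStep (0, [])
  (st.2.length : Int)

-- ===== PRECONDITION & SPEC =====
def Spec_solve (courses : List (Int × Int)) (out : Int) : Prop := out = solve_alt courses
instance (courses : List (Int × Int)) (out : Int) : Decidable (Spec_solve courses out) := by unfold Spec_solve; infer_instance

-- ===== CLAIM (what is proved, stated in full; the proofs are below) =====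
def Claim_equal_solve : Prop := ∀ (courses : List (Int × Int)), Dom_solve courses → Spec_solve courses (solve courses)

-- ===== LEMMAS AND PROOFS =====

-- relation between A's state (total, heap of negated durations) and B's state
-- (total, sorted list of durations)
def InvAB (a b : Int × List Int) : Prop :=
  a.1 = b.1 ∧ a.2.Perm (b.2.map (fun x : Int => -x)) ∧ b.2.Pairwise (· ≤ ·)

theorem insortB_perm (x : Int) (s : List Int) : (insortB x s).Perm (x :: s) := by
  induction s with
  | nil => simp [insortB]
  | cons y t ih =>
    simp only [insortB]
    split
    · exact ((ih.cons y).trans (List.Perm.swap x y t))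
    · exact List.Perm.refl _

theorem insortB_pairwise (x : Int) (s : List Int) (hs : s.Pairwise (· ≤ ·)) :
    (insortB x s).Pairwise (· ≤ ·) := by
  induction s with
  | nil => simp [insortB]
  | cons y t ih =>
    rw [List.pairwise_cons] at hs
    simp only [insortB]
    split
    · rename_i hyx
      rw [List.pairwise_cons]
      refine ⟨fun b hb => ?_, ih hs.2⟩
      have hb' : b ∈ x :: t := (insortB_perm x t).mem_iff.mp hb
      rw [List.mem_cons] at hb'
      rcases hb' with rfl | hmem
      · omega
      · exact hs.1 b hmem
    · rename_i hyx
      rw [List.pairwise_cons]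
      refine ⟨fun b hb => ?_, List.pairwise_cons.mpr hs⟩
      rw [List.mem_cons] at hb
      rcases hb with rfl | hmem
      · omega
      · have := hs.1 b hmem; omega

theorem getLastD_mem (s : List Int) (h : s ≠ []) : s.getLast?.getD 0 ∈ s := by
  rw [List.getLast?_eq_some_getLast h]
  exact List.getLast_mem h

theorem pairwise_le_getLast (s : List Int) (hs : s.Pairwise (· ≤ ·)) (y : Int) (hy : y ∈ s) :
    y ≤ s.getLast?.getD 0 := by
  induction s with
  | nil => simp at hy
  | cons a t ih =>
    rw [List.pairwise_cons] at hs
    rw [List.mem_cons] at hy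
    cases t with
    | nil =>
      rcases hy with rfl | hy
      · simp
      · simp at hy
    | cons b u =>
      have hgl : (a :: b :: u).getLast? = (b :: u).getLast? := List.getLast?_cons_cons ..
      rw [hgl]
      rcases hy with rfl | hy
      · exact hs.1 _ (getLastD_mem (b :: u) (by simp))
      · exact ih hs.2 hy

theorem dropLast_perm_erase_getLast (s : List Int) (hne : s ≠ []) :
    s.dropLast.Perm (s.erase (s.getLast?.getD 0)) := by
  have hM : s.getLast?.getD 0 = s.getLast hne := by
    rw [List.getLast?_eq_some_getLast hne]; rfl
  rw [hM]
  have hmem : s.getLast hne ∈ s := List.getLast_mem hne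
  have h1 : s.Perm (s.getLast hne :: s.erase (s.getLast hne)) := List.perm_cons_erase hmem
  have h2 : s.Perm (s.getLast hne :: s.dropLast) := by
    conv_lhs => rw [← List.dropLast_append_getLast hne]
    exact List.perm_append_comm
  exact List.Perm.cons_inv (h2.symm.trans h1)

theorem step_inv (a b : Int × List Int) (c : Int × Int) (h : InvAB a b) :
    InvAB (solveStep a c) (solveAltStep b c) := by
  obtain ⟨ht, hperm, hsorted⟩ := h
  set sel := insortB c.1 b.2 with hsel
  have hselperm : sel.Perm (c.1 :: b.2) := insortB_perm _ _
  have hselsorted : sel.Pairwise (· ≤ ·) := insortB_pairwise _ _ hsorted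
  have hselne : sel ≠ [] := by
    intro h0
    have := hselperm.length_eq
    rw [h0] at this
    simp at this
  set M := sel.getLast?.getD 0 with hM
  have hMmem : M ∈ sel := getLastD_mem sel hselne
  -- A's heap after the push is a permutation of sel, negated
  have hheap : (heappushA a.2 (-c.1)).Perm (sel.map (fun x : Int => -x)) := by
    unfold heappushA
    have p1 : (a.2 ++ [-c.1]).Perm ((-c.1) :: a.2) := List.perm_append_comm
    have p2 : ((-c.1) :: a.2).Perm ((-c.1) :: b.2.map (fun x : Int => -x)) := hperm.cons _
    have p3 : ((c.1 :: b.2).map (fun x : Int => -x)).Perm (sel.map (fun x : Int => -x)) :=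
      (hselperm.map _).symm
    refine p1.trans (p2.trans ?_)
    simpa using p3
  -- min of the pushed heap is -M
  have hmin : (heappushA a.2 (-c.1)).min? = some (-M) := by
    rw [List.min?_eq_some_iff]
    constructor
    · exact hheap.mem_iff.mpr (List.mem_map_of_mem hMmem)
    · intro z hz
      rcases List.mem_map.mp (hheap.mem_iff.mp hz) with ⟨y, hy, rfl⟩
      have := pairwise_le_getLast sel hselsorted y hy
      omega
  unfold solveStep solveAltStep
  dsimp only
  rw [ht, ← hsel, ← hM]
  by_cases hc : b.1 + c.1 > c.2
  · simp only [hc, if_pos]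
    unfold heappopA
    rw [hmin]
    dsimp only
    refine ⟨by omega, ?_, ?_⟩
    · -- erase (-M) on the heap matches dropLast on sel
      have e1 : ((heappushA a.2 (-c.1)).erase (-M)).Perm
          ((sel.map (fun x : Int => -x)).erase (-M)) := hheap.erase _
      have e2 : (sel.map (fun x : Int => -x)).erase (-M) = (sel.erase M).map (fun x : Int => -x) := by
        rw [List.map_erase (fun x y hxy => by omega)]
      have e3 : (sel.dropLast.map (fun x : Int => -x)).Perm ((sel.erase M).map (fun x : Int => -x)) :=
        (dropLast_perm_erase_getLast sel hselne).map _
      exact (e1.trans (e2 ▸ e3.symm))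
    · exact hselsorted.sublist (List.dropLast_sublist sel)
  · simp only [hc, if_false]
    exact ⟨rfl, hheap, hselsorted⟩

theorem foldl_inv (cs : List (Int × Int)) (a b : Int × List Int) (h : InvAB a b) :
    InvAB (cs.foldl solveStep a) (cs.foldl solveAltStep b) := by
  induction cs generalizing a b with
  | nil => simpa using h
  | cons c t ih => exact ih _ _ (step_inv a b c h)

-- ===== VERDICT (by name: the statement is the Claim_ definition above) =====
theorem solve_spec : Claim_equal_solve := by
  intro courses _
  unfold Spec_solve solve solve_alt
  have h := foldl_inv (PySem.List.sorted courses (fun x => x.2) false)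
    (0, []) (0, []) ⟨rfl, by simp, by simp⟩
  simp only []
  rw [h.2.1.length_eq]
  simp
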